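-- pv_equiv track=rewrite | github.com/sid25489/quizapp | quizproject/quizapp/validators.py | find_duplicate_within_upload
-- ===== SOURCE A (Python) =====
-- from typing import List, Dict, Tuple, Any
--
-- def find_duplicate_within_upload(questions: List[Dict]) -> List[Tuple[int, int]]:
--     """
--     Find duplicate question texts within the uploaded data.
--     Returns list of (row1, row2) tuples that are duplicates.
--     """
--     duplicates = []
--     seen = {}
--
--     for idx, question in enumerate(questions):
--         question_text = str(question.get('question', '')).strip().lower()
--         if question_text in seen:
--             duplicates.append((seen[question_text], idx))
--         else:
--             seen[question_text] = idx
--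
--     return duplicates
-- ===== SOURCE B (Python) =====
-- from typing import List, Dict, Tuple
--
--
-- def find_duplicate_within_upload(questions: List[Dict]) -> List[Tuple[int, int]]:
--     """
--     Find duplicate question texts within the uploaded data.
--     Groups row indices by normalized text, then emits (first_row, later_row)
--     for every later occurrence, ordered chronologically by the later row.
--     """
--     groups = {}
--     for idx, question in enumerate(questions):
--         text = str(question.get('question', '')).strip().lower()
--         groups.setdefault(text, []).append(idx)
--
--     pairs = []
--     for indices in groups.values():
--         first = indices[0]
--         for later in indices[1:]:
--             pairs.append((first, later))
--
--     return sorted(pairs, key=lambda p: p[1])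
-- ===== Notes on version B (the rewrite author's own statement) =====
-- stated objective: alternative
-- what changed: A does one pass with a running seen-dict, emitting (first,idx) the moment a duplicate appears; B first groups all row indices by normalized text, then emits (first, later) per group and sorts the pairs by the later row index to restore chronological order.
import Mathlib
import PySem

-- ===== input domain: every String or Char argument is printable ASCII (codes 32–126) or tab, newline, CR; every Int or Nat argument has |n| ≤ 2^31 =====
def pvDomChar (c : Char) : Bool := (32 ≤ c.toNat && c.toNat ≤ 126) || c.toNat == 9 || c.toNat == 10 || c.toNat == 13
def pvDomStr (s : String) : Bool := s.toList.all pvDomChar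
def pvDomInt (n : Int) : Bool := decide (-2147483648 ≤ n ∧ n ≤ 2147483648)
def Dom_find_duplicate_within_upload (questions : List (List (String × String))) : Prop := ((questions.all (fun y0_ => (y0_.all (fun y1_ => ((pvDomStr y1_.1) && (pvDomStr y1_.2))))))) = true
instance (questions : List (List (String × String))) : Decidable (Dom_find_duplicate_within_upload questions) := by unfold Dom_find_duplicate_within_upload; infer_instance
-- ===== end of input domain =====

-- B replaces A's single pass over a running `seen` dict by group-by-text, emit per group,
-- then sort by the later row index (alternative decomposition, same cost).

-- str(question.get('question','')).strip().lower() — shared normalisation helper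
def pvNorm (q : List (String × String)) : String :=
  PySem.Str.lower (PySem.Str.strip ((PySem.Dict.mk q).getD "question" ""))

-- ===== PORT A =====
def find_duplicate_within_upload (questions : List (List (String × String))) : List (Int × Int) :=
  ((PySem.List.enumerate questions 0).foldl
    (fun (st : List (Int × Int) × PySem.Dict String Int) p =>
      let t := pvNorm p.2
      if st.2.contains t then (st.1 ++ [(st.2.getD t 0, p.1)], st.2)
      else (st.1, st.2.insert t p.1))
    ([], PySem.Dict.empty)).1

-- ===== PORT B =====
-- indices[1:] pairing of one group: [] for a singleton, (first, later) for each later index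
def pvPairsOf : List Int → List (Int × Int)
  | [] => []
  | f :: t => t.map (fun later => (f, later))

def find_duplicate_within_upload_alt (questions : List (List (String × String))) : List (Int × Int) :=
  let groups := (PySem.List.enumerate questions 0).foldl
    (fun (g : PySem.Dict String (List Int)) p => g.modify (pvNorm p.2) [] (· ++ [p.1]))
    PySem.Dict.empty
  let pairs := groups.values.foldl (fun acc idxs => acc ++ pvPairsOf idxs) []
  PySem.List.sorted pairs (fun p => p.2)

-- ===== PRECONDITION & SPEC =====
def Spec_find_duplicate_within_upload (questions : List (List (String × String))) (out : List (Int × Int)) : Prop := out = find_duplicate_within_upload_alt questions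
instance (questions : List (List (String × String))) (out : List (Int × Int)) : Decidable (Spec_find_duplicate_within_upload questions out) := by unfold Spec_find_duplicate_within_upload; infer_instance

-- ===== CLAIM (what is proved, stated in full; the proofs are below) =====
def Claim_equal_find_duplicate_within_upload : Prop := ∀ (questions : List (List (String × String))), Dom_find_duplicate_within_upload questions → Spec_find_duplicate_within_upload questions (find_duplicate_within_upload questions)

-- ===== LEMMAS AND PROOFS =====

-- A's loop body / B's grouping loop body, over the (normalizedText, rowIndex) pair
def pvStepA (st : List (Int × Int) × PySem.Dict String Int) (p : String × Int) :
    List (Int × Int) × PySem.Dict String Int :=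
  if st.2.contains p.1 then (st.1 ++ [(st.2.getD p.1 0, p.2)], st.2)
  else (st.1, st.2.insert p.1 p.2)

def pvStepG (g : PySem.Dict String (List Int)) (p : String × Int) : PySem.Dict String (List Int) :=
  g.modify p.1 [] (· ++ [p.2])

def pvEmit (g : PySem.Dict String (List Int)) : List (Int × Int) :=
  g.values.flatMap pvPairsOf

def pvKs (questions : List (List (String × String))) : List (String × Int) :=
  (PySem.List.enumerate questions 0).map (fun p => (pvNorm p.2, p.1))

theorem pvA_eq (questions : List (List (String × String))) :
    find_duplicate_within_upload questions = ((pvKs questions).foldl pvStepA ([], PySem.Dict.empty)).1 := by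
  simp [find_duplicate_within_upload, pvKs, List.foldl_map, pvStepA]

theorem pvB_eq (questions : List (List (String × String))) :
    find_duplicate_within_upload_alt questions
      = PySem.List.sorted (pvEmit ((pvKs questions).foldl pvStepG PySem.Dict.empty)) (fun p => p.2) := by
  simp [find_duplicate_within_upload_alt, pvKs, List.foldl_map, pvStepG, pvEmit,
    PySem.Dict.values, List.flatMap_def, List.map_map, Function.comp_def]

-- replacing the entry of a key that is absent from a segment is the identity on that segment
theorem pvMap_replace_id (L : List (String × List Int)) (k : String) (w : List Int)
    (h : ∀ p ∈ L, p.1 ≠ k) :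
    L.map (fun p => if p.1 == k then (k, w) else p) = L := by
  induction L with
  | nil => rfl
  | cons a t ih =>
    have ha := h a (by simp)
    rw [List.map_cons, if_neg (by simpa using ha), ih (fun p hp => h p (by simp [hp]))]

-- moving one appended pair from the middle segment to the back is a permutation
theorem pvPermShuffle {α : Type} (X P Z : List α) (e : α) :
    (X ++ (P ++ [e]) ++ Z).Perm ((X ++ P ++ Z) ++ [e]) := by
  have h1 : X ++ (P ++ [e]) ++ Z = X ++ P ++ ([e] ++ Z) := by simp
  have h2 : (X ++ P ++ Z) ++ [e] = X ++ P ++ (Z ++ [e]) := by simp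
  rw [h1, h2]
  exact List.Perm.append_left _ List.perm_append_comm

-- main invariant induction: the emitted pairs of B's groups are a permutation of A's output
theorem pvMain (ks : List (String × Int)) (acc : List (Int × Int))
    (seen : PySem.Dict String Int) (g : PySem.Dict String (List Int))
    (hhead : ∀ k, seen.get? k = (g.getD k []).head?)
    (hnd : g.keys.Nodup)
    (hne : ∀ p ∈ g.items, p.2 ≠ [])
    (hperm : (pvEmit g).Perm acc) :
    (pvEmit (ks.foldl pvStepG g)).Perm ((ks.foldl pvStepA (acc, seen)).1) := by
  induction ks generalizing acc seen g with
  | nil => simpa using hperm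
  | cons p rest ih =>
    simp only [List.foldl_cons]
    by_cases hc : seen.contains p.1 = true
    · -- p.1 already seen: A appends (first index, p.2); B appends p.2 to the group
      obtain ⟨v, hv⟩ : ∃ v, seen.get? p.1 = some v := by
        rw [PySem.Dict.contains_eq_isSome_get?] at hc
        exact Option.isSome_iff_exists.mp hc
      obtain ⟨t, hgd⟩ : ∃ t, g.getD p.1 [] = v :: t := by
        have := (hhead p.1).symm.trans hv
        exact List.head?_eq_some_iff.mp this
      -- g contains p.1 and stores v :: t there
      have hcg : g.contains p.1 = true := by
        cases h : g.contains p.1 with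
        | true => rfl
        | false =>
          exfalso
          have := PySem.Dict.getD_of_not_contains g ([] : List Int) h
          rw [hgd] at this
          exact List.cons_ne_nil _ _ this
      have hget : g.get? p.1 = some (v :: t) := by
        rw [PySem.Dict.contains_eq_isSome_get?] at hcg
        obtain ⟨w, hw⟩ := Option.isSome_iff_exists.mp hcg
        have := PySem.Dict.getD_eq_get?_getD g p.1 ([] : List Int)
        rw [hgd, hw] at this; simp at this; rw [hw, this]
      obtain ⟨L1, L2, hitems⟩ := List.append_of_mem (PySem.Dict.mem_items_of_get?_eq_some g hget)
      -- keys of the two segments avoid p.1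
      have hkeys : g.keys = L1.map (·.1) ++ p.1 :: L2.map (·.1) := by
        simp only [PySem.Dict.keys, hitems]; simp
      have hnd' := hnd
      rw [hkeys] at hnd'
      have hk1 : ∀ q ∈ L1, q.1 ≠ p.1 := by
        intro q hq h
        rcases List.nodup_append.mp hnd' with ⟨-, -, hdisj⟩
        exact hdisj q.1 (List.mem_map_of_mem hq) p.1 (by simp) h
      have hk2 : ∀ q ∈ L2, q.1 ≠ p.1 := by
        intro q hq h
        rcases List.nodup_append.mp hnd' with ⟨-, hn2, -⟩
        rw [List.nodup_cons] at hn2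
        have hm : q.1 ∈ L2.map (·.1) := List.mem_map_of_mem hq
        rw [h] at hm
        exact hn2.1 hm
      -- the step on each side
      have hstepA : pvStepA (acc, seen) p = (acc ++ [(v, p.2)], seen) := by
        simp [pvStepA, hc, PySem.Dict.getD_of_get?_eq_some _ _ hv]
      have hstepG : pvStepG g p = g.insert p.1 ((v :: t) ++ [p.2]) := by
        simp [pvStepG, PySem.Dict.modify, hgd]
      have hitems' : (pvStepG g p).items = L1 ++ (p.1, (v :: t) ++ [p.2]) :: L2 := by
        rw [hstepG, PySem.Dict.items_insert_of_contains _ _ hcg, hitems]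
        simp only [List.map_append, List.map_cons]
        rw [pvMap_replace_id L1 _ _ hk1, pvMap_replace_id L2 _ _ hk2]
        simp
      rw [hstepA]
      refine ih (acc ++ [(v, p.2)]) seen (pvStepG g p) ?_ ?_ ?_ ?_
      · intro k
        rw [hstepG, PySem.Dict.getD_insert]
        by_cases hk : k = p.1
        · subst hk; rw [hv]; simp
        · simp [hk, hhead k]
      · have : (pvStepG g p).keys = L1.map (·.1) ++ p.1 :: L2.map (·.1) := by
          simp only [PySem.Dict.keys, hitems']; simp
        rw [this]; exact hnd'
      · intro q hq
        rw [hitems'] at hq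
        rcases List.mem_append.mp hq with h1 | h1
        · exact hne q (by rw [hitems]; exact List.mem_append.mpr (Or.inl h1))
        · rcases List.mem_cons.mp h1 with h2 | h2
          · subst h2; simp
          · exact hne q (by rw [hitems]; simp [h2])
      · -- emit of the new groups ~ acc ++ [(v, p.2)]
        have hEg : pvEmit g
            = L1.flatMap (fun q => pvPairsOf q.2) ++ pvPairsOf (v :: t)
              ++ L2.flatMap (fun q => pvPairsOf q.2) := by
          simp [pvEmit, PySem.Dict.values, hitems, List.flatMap_def, List.map_map,
            Function.comp_def]
        have hEg' : pvEmit (pvStepG g p)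
            = L1.flatMap (fun q => pvPairsOf q.2) ++ (pvPairsOf (v :: t) ++ [(v, p.2)])
              ++ L2.flatMap (fun q => pvPairsOf q.2) := by
          simp [pvEmit, PySem.Dict.values, hitems', List.flatMap_def, List.map_map,
            Function.comp_def, pvPairsOf, List.map_append]
        rw [hEg']
        refine (pvPermShuffle _ _ _ _).trans ?_
        rw [← hEg]
        exact hperm.append_right _
    · -- fresh text: A records it in seen; B opens a singleton group (emits nothing)
      have hc' : seen.contains p.1 = false := by revert hc; cases seen.contains p.1 <;> simp
      have hv : seen.get? p.1 = none := by
        have := PySem.Dict.contains_eq_isSome_get? seen p.1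
        rw [hc'] at this
        exact Option.not_isSome_iff_eq_none.mp (by rw [← this]; simp)
      have hgd : g.getD p.1 [] = [] := List.head?_eq_none_iff.mp ((hhead p.1).symm.trans hv)
      have hcg : g.contains p.1 = false := by
        by_contra h
        have hcg' : g.contains p.1 = true := by revert h; cases g.contains p.1 <;> simp
        rw [PySem.Dict.contains_eq_isSome_get?] at hcg'
        obtain ⟨w, hw⟩ := Option.isSome_iff_exists.mp hcg'
        have := PySem.Dict.getD_of_get?_eq_some g ([] : List Int) hw
        rw [hgd] at this
        exact hne (p.1, w) (PySem.Dict.mem_items_of_get?_eq_some g hw) (by simp [← this])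
      have hstepA : pvStepA (acc, seen) p = (acc, seen.insert p.1 p.2) := by
        simp [pvStepA, hc']
      have hstepG : pvStepG g p = g.insert p.1 [p.2] := by
        simp [pvStepG, PySem.Dict.modify, hgd]
      have hitems' : (pvStepG g p).items = g.items ++ [(p.1, [p.2])] := by
        rw [hstepG, PySem.Dict.items_insert_of_not_contains _ _ hcg]
      rw [hstepA]
      refine ih acc (seen.insert p.1 p.2) (pvStepG g p) ?_ ?_ ?_ ?_
      · intro k
        rw [hstepG, PySem.Dict.getD_insert, PySem.Dict.get?_insert]
        by_cases hk : k = p.1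
        · simp [hk]
        · simp [hk, hhead k]
      · rw [hstepG, PySem.Dict.keys_insert_of_not_contains _ _ hcg]
        refine List.Nodup.append hnd (by simp) ?_
        intro a ha hb
        simp at hb
        subst hb
        exact (by simp [hcg] : ¬ g.contains p.1 = true)
          ((PySem.Dict.contains_iff_mem_keys g p.1).mpr ha)
      · intro q hq
        rw [hitems'] at hq
        rcases List.mem_append.mp hq with h1 | h1
        · exact hne q h1
        · simp at h1; subst h1; simp
      · have : pvEmit (pvStepG g p) = pvEmit g := by
          simp [pvEmit, hitems', PySem.Dict.values, pvPairsOf]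
        rw [this]; exact hperm

-- A's output has strictly increasing second components
theorem pvPairwiseA (ks : List (String × Int)) (acc : List (Int × Int))
    (seen : PySem.Dict String Int)
    (hks : (ks.map (·.2)).Pairwise (· < ·))
    (hacc : acc.Pairwise (fun a b => a.2 < b.2))
    (hlt : ∀ a ∈ acc, ∀ b ∈ ks, a.2 < b.2) :
    ((ks.foldl pvStepA (acc, seen)).1).Pairwise (fun a b => a.2 < b.2) := by
  induction ks generalizing acc seen with
  | nil => simpa using hacc
  | cons p rest ih =>
    simp only [List.map_cons, List.pairwise_cons] at hks
    simp only [List.foldl_cons]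
    by_cases hc : seen.contains p.1 = true
    · have hstepA : pvStepA (acc, seen) p = (acc ++ [(seen.getD p.1 0, p.2)], seen) := by
        simp [pvStepA, hc]
      rw [hstepA]
      refine ih (acc ++ [(seen.getD p.1 0, p.2)]) seen hks.2 ?_ ?_
      · rw [List.pairwise_append]
        refine ⟨hacc, by simp, ?_⟩
        intro a ha b hb
        simp at hb; subst hb
        exact hlt a ha p (by simp)
      · intro a ha b hb
        rcases List.mem_append.mp ha with h1 | h1
        · exact hlt a h1 b (by simp [hb])
        · simp at h1; subst h1
          exact hks.1 b.2 (List.mem_map_of_mem hb)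
    · have hc' : seen.contains p.1 = false := by revert hc; cases seen.contains p.1 <;> simp
      have hstepA : pvStepA (acc, seen) p = (acc, seen.insert p.1 p.2) := by
        simp [pvStepA, hc']
      rw [hstepA]
      exact ih acc _ hks.2 hacc (fun a ha b hb => hlt a ha b (by simp [hb]))

-- ===== VERDICT (by name: the statement is the Claim_ definition above) =====
theorem find_duplicate_within_upload_spec : Claim_equal_find_duplicate_within_upload := by
  intro questions _
  unfold Spec_find_duplicate_within_upload
  rw [pvA_eq, pvB_eq]
  have hperm := pvMain (pvKs questions) [] PySem.Dict.empty PySem.Dict.empty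
    (by intro k; simp [PySem.Dict.get?_empty, PySem.Dict.getD_empty])
    (by simp [PySem.Dict.keys_empty])
    (by intro p hp; simp [PySem.Dict.empty] at hp)
    (by simp [pvEmit, PySem.Dict.empty, PySem.Dict.values])
  have hpw : ((pvKs questions).map (·.2)).Pairwise (· < ·) := by
    have := PySem.List.pairwise_lt_enumerate (xs := questions) (s := 0)
    simp only [pvKs, List.map_map]
    simpa [List.pairwise_map] using this
  have hpa := pvPairwiseA (pvKs questions) [] PySem.Dict.empty hpw (by simp) (by simp)
  exact (PySem.List.sorted_eq_of_perm_of_pairwise_lt _ _ _ (hperm.symm) hpa).symm
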